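-- pv_equiv track=rewrite | github.com/MaySaadi/switch | common._in_arr.py | find_median_char_manual
-- ===== SOURCE A (Python) =====
-- def find_median_char_manual(string):
--     characters = list(string)
--     for i in range(len(characters)):
--         min_index = i
--         for j in range(i + 1, len(characters)):
--             if characters[j] < characters[min_index]:
--                 min_index = j
--         characters[i], characters[min_index] = characters[min_index], characters[i]
--
--     length = len(characters)
--     if length % 2 == 1:
--         median_char = characters[length // 2]
--     else:
--         median_char = characters[length // 2 - 1]
--     return  median_char
-- ===== SOURCE B (Python) =====
-- def find_median_char_manual(string):
--     chars = sorted(string)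
--     return chars[(len(chars) - 1) // 2]
-- ===== Notes on version B (the rewrite author's own statement) =====
-- stated objective: faster
-- what changed: Replaces the hand-written quadratic selection sort with Python's built-in sorted() and a single closed-form median index (len-1)//2 instead of the parity branch.
import Mathlib
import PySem

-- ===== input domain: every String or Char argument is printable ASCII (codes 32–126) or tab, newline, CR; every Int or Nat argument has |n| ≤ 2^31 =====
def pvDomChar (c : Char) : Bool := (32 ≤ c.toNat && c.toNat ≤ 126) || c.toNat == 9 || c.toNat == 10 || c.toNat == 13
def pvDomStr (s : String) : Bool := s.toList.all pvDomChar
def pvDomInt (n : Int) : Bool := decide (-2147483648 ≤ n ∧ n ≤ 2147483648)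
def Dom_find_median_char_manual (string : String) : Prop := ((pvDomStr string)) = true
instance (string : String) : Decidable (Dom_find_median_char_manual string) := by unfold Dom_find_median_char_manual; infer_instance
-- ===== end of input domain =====

-- B replaces A's hand-written quadratic selection sort by the built-in sort and a
-- single closed-form median index; B is asymptotically faster (O(n log n) vs O(n^2)).

-- ===== PORT A =====
-- Inner loop: min_index scan over j in range(i+1, len).  All indices are Nat and
-- provably in range on every reachable call, so List.getD with a dummy default is
-- exact for Python's characters[j].
def pvMinFrom (a : List Char) (i n : Nat) : Nat :=
  (List.range' (i + 1) (n - (i + 1))).foldl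
    (fun m j => if a.getD j ' ' < a.getD m ' ' then j else m) i

-- characters[i], characters[min_index] = characters[min_index], characters[i]
def pvSwap (a : List Char) (i m : Nat) : List Char :=
  (a.set i (a.getD m ' ')).set m (a.getD i ' ')

def pvStep (n : Nat) (a : List Char) (i : Nat) : List Char :=
  pvSwap a i (pvMinFrom a i n)

def find_median_char_manual (string : String) : String :=
  let characters := string.toList
  let n := characters.length
  let characters := (List.range n).foldl (pvStep n) characters
  let length : Int := (n : Int)
  let idx : Int :=
    if PySem.Int.mod length 2 = 1 then PySem.Int.floordiv length 2
    else PySem.Int.floordiv length 2 - 1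
  match PySem.List.pyGet? characters idx with
  | some c => String.mk [c]
  | none => ""   -- Python raises IndexError here (empty string); excluded by Pre_

-- ===== PORT B =====
def find_median_char_manual_alt (string : String) : String :=
  let chars := PySem.List.sorted string.toList (fun c => c) false
  match PySem.List.pyGet? chars (PySem.Int.floordiv ((chars.length : Int) - 1) 2) with
  | some c => String.mk [c]
  | none => ""   -- Python raises IndexError here (empty string); excluded by Pre_

-- ===== PRECONDITION & SPEC =====
-- A raises IndexError on the empty string (characters[-1] of an empty list); Pre_ excludes exactly that input.
def Pre_find_median_char_manual (string : String) : Prop := string ≠ ""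
instance (string : String) : Decidable (Pre_find_median_char_manual string) := by
  unfold Pre_find_median_char_manual; infer_instance

def pvWitness_find_median_char_manual : String := "ba"

def Spec_find_median_char_manual (string : String) (out : String) : Prop := out = find_median_char_manual_alt string
instance (string : String) (out : String) : Decidable (Spec_find_median_char_manual string out) := by unfold Spec_find_median_char_manual; infer_instance

-- ===== CLAIM (what is proved, stated in full; the proofs are below) =====
def Claim_equal_find_median_char_manual : Prop := ∀ (string : String), Dom_find_median_char_manual string → Pre_find_median_char_manual string → Spec_find_median_char_manual string (find_median_char_manual string)

-- ===== LEMMAS AND PROOFS =====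

-- The min-scan fold: the result is the start index or a scanned index, and its
-- element is ≤ the start element and ≤ every scanned element.
theorem pvMinFold_spec (a : List Char) (L : List Nat) (m0 : Nat) :
    (L.foldl (fun m j => if a.getD j ' ' < a.getD m ' ' then j else m) m0 = m0 ∨
      L.foldl (fun m j => if a.getD j ' ' < a.getD m ' ' then j else m) m0 ∈ L) ∧
    a.getD (L.foldl (fun m j => if a.getD j ' ' < a.getD m ' ' then j else m) m0) ' ' ≤ a.getD m0 ' ' ∧

    ∀ j ∈ L, a.getD (L.foldl (fun m j => if a.getD j ' ' < a.getD m ' ' then j else m) m0) ' ' ≤ a.getD j ' ' := by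
  induction L generalizing m0 with
  | nil => simp
  | cons j L ih =>
    simp only [List.foldl_cons]
    by_cases h : a.getD j ' ' < a.getD m0 ' '
    · simp only [if_pos h]
      obtain ⟨h1, h2, h3⟩ := ih j
      refine ⟨?_, le_trans h2 (le_of_lt h), ?_⟩
      · rcases h1 with h1 | h1
        · exact Or.inr (List.mem_cons.mpr (Or.inl h1))
        · exact Or.inr (List.mem_cons_of_mem _ h1)
      · intro j' hj'
        rcases List.mem_cons.mp hj' with rfl | hj'
        · exact h2
        · exact h3 j' hj'
    · simp only [if_neg h]
      obtain ⟨h1, h2, h3⟩ := ih m0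
      refine ⟨?_, h2, ?_⟩
      · rcases h1 with h1 | h1
        · exact Or.inl h1
        · exact Or.inr (List.mem_cons_of_mem _ h1)
      · intro j' hj'
        rcases List.mem_cons.mp hj' with rfl | hj'
        · exact le_trans h2 (le_of_not_gt h)
        · exact h3 j' hj'

theorem pvMinFrom_spec (a : List Char) (i : Nat) (hi : i < a.length) :
    i ≤ pvMinFrom a i a.length ∧ pvMinFrom a i a.length < a.length ∧
    ∀ j, i ≤ j → j < a.length →
      a.getD (pvMinFrom a i a.length) ' ' ≤ a.getD j ' ' := by
  obtain ⟨h1, h2, h3⟩ := pvMinFold_spec a (List.range' (i + 1) (a.length - (i + 1))) i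
  unfold pvMinFrom
  set m := (List.range' (i + 1) (a.length - (i + 1))).foldl
    (fun m j => if a.getD j ' ' < a.getD m ' ' then j else m) i with hm
  have hbound : i ≤ m ∧ m < a.length := by
    rcases h1 with h | h
    · omega
    · have := List.mem_range'_1.mp h; omega
  refine ⟨hbound.1, hbound.2, fun j hij hjn => ?_⟩
  rcases Nat.eq_or_lt_of_le hij with rfl | hlt
  · exact h2
  · exact h3 j (List.mem_range'_1.mpr (by omega))

theorem pvSwap_length (a : List Char) (i m : Nat) : (pvSwap a i m).length = a.length := by
  simp [pvSwap]

theorem pvSwap_perm (a : List Char) (i m : Nat) (hi : i < a.length) (hm : m < a.length) :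
    (pvSwap a i m).Perm a := by
  unfold pvSwap
  rw [List.getD_eq_getElem a ' ' hi, List.getD_eq_getElem a ' ' hm]
  by_cases h : i = m
  · subst h
    rw [List.set_set, List.set_getElem_self]
  · -- count argument: the double set swaps two existing entries
    refine (List.perm_iff_count.mpr ?_)
    intro x
    have hcount : ∀ (l : List Char) (p : Nat) (hp : p < l.length) (y : Char),
        (l.set p y).count x = l.count x + (if y = x then 1 else 0) - (if l[p] = x then 1 else 0) := by
      intro l p hp y
      have h1 : List.Perm (l.set p y) (y :: l.eraseIdx p) := List.set_perm_cons_eraseIdx hp y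
      have h2 : List.Perm l (l[p] :: l.eraseIdx p) := (List.getElem_cons_eraseIdx_perm hp).symm
      have c1 := h1.count_eq x
      have c2 := h2.count_eq x
      rw [List.count_cons] at c1 c2
      simp only [beq_iff_eq] at c1 c2
      omega
    have hi' : i < (a.set i a[m]).length := by simpa using hi
    have hm' : m < (a.set i a[m]).length := by simpa using hm
    rw [hcount _ m hm' a[i], hcount a i hi a[m]]
    have hgm : (a.set i a[m])[m] = a[m] := by
      rw [List.getElem_set]; simp [h]
    rw [hgm]
    have h1 : (if a[m] = x then 1 else 0) ≤ a.count x := by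
      split_ifs with hx
      · subst hx; exact List.count_pos_iff.mpr (List.getElem_mem hm)
      · omega
    have h2 : (if a[i] = x then 1 else 0) ≤ a.count x := by
      split_ifs with hx
      · subst hx; exact List.count_pos_iff.mpr (List.getElem_mem hi)
      · omega
    omega

-- getD through pvSwap at an untouched (smaller) index
theorem pvSwap_getD_lt (a : List Char) (i m j : Nat) (hj : j < i) (hjm : j < m) :
    (pvSwap a i m).getD j ' ' = a.getD j ' ' := by
  unfold pvSwap
  by_cases hja : j < a.length
  · rw [List.getD_eq_getElem _ ' ' (by simpa using hja), List.getD_eq_getElem _ ' ' hja]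
    rw [List.getElem_set, List.getElem_set]
    rw [if_neg (by omega), if_neg (by omega)]
  · have h1 : a.length ≤ j := Nat.le_of_not_lt hja
    simp only [List.getD_eq_getElem?_getD]
    rw [List.getElem?_eq_none (by simpa using h1), List.getElem?_eq_none h1]

-- The selection-sort invariant after k outer iterations.
def pvInv (cs : List Char) (k : Nat) (a : List Char) : Prop :=
  a.length = cs.length ∧ a.Perm cs ∧ (a.take k).Pairwise (· ≤ ·) ∧
  ∀ x ∈ a.take k, ∀ y ∈ a.drop k, x ≤ y

theorem pvStep_inv (cs a : List Char) (k : Nat) (hk : k < cs.length)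
    (h : pvInv cs k a) : pvInv cs (k + 1) (pvStep cs.length a k) := by
  obtain ⟨hlen, hperm, hpw, hord⟩ := h
  have hk' : k < a.length := by omega
  obtain ⟨hm1, hm2, hmin⟩ := by
    have := pvMinFrom_spec a k hk'
    rwa [hlen] at this
  set m := pvMinFrom a k cs.length with hmdef
  have hm2' : m < a.length := by omega
  have hstep : pvStep cs.length a k = pvSwap a k m := rfl
  set a' := pvSwap a k m with ha'
  clear_value m a'
  have hlen' : a'.length = a.length := ha' ▸ pvSwap_length a k m
  have hperm' : a'.Perm a := ha' ▸ pvSwap_perm a k m hk' hm2'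
  -- a'[j] = a[j] for j < k, a'[k] = a[m]
  have hgk : ∀ j, j < a'.length → (hja : j < a.length) → j < k → a'[j] = a[j] := by
    intro j hja' hja hjk
    have h := pvSwap_getD_lt a k m j hjk (by omega)
    rw [← ha'] at h
    rwa [List.getD_eq_getElem _ ' ' hja', List.getD_eq_getElem _ ' ' hja] at h
  have hk'' : k < a'.length := by omega
  have ham : a'[k]'hk'' = a[m] := by
    subst ha'
    simp only [pvSwap, List.getElem_set]
    by_cases hkm : m = k
    · subst hkm
      simp [List.getD_eq_getElem?_getD, List.getElem?_eq_getElem hm2']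
    · simp [hkm, List.getD_eq_getElem?_getD, List.getElem?_eq_getElem hm2']
  -- take k of a' = take k of a
  have htake : a'.take k = a.take k := by
    apply List.ext_getElem
    · simp [hlen']
    · intro j h1 h2
      rw [List.length_take] at h1
      rw [List.getElem_take, List.getElem_take]
      exact hgk j (by omega) (by omega) (by omega)
  have htake1 : a'.take (k + 1) = a.take k ++ [a[m]] := by
    rw [List.take_add_one, htake]
    have : a'[k]? = some a[m] := by rw [List.getElem?_eq_getElem hk'', ham]
    simp [this]
  -- membership in a'.drop k transfers to a.drop k
  have hdropsub : ∀ y ∈ a'.drop k, y ∈ a.drop k := by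
    have hdp : (a'.drop k).Perm (a.drop k) := by
      rw [ha']
      unfold pvSwap
      rw [List.drop_set, List.drop_set]
      rw [if_neg (by omega), if_neg (by omega)]
      have hms : m - k < (a.drop k).length := by simp; omega
      have hks : k - k < ((a.drop k).set (m - k) (a.getD k ' ')).length := by simp; omega
      have hgdk : a.getD k ' ' = (a.drop k).getD (k - k) ' ' := by
        rw [List.getD_eq_getElem _ ' ' hk', List.getD_eq_getElem _ ' ' (by simp; omega)]
        rw [List.getElem_drop]; congr 1; omega
      have hgdm : a.getD m ' ' = (a.drop k).getD (m - k) ' ' := by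
        rw [List.getD_eq_getElem _ ' ' hm2', List.getD_eq_getElem _ ' ' (by simp; omega)]
        rw [List.getElem_drop]; congr 1; omega
      rw [hgdk, hgdm]
      exact pvSwap_perm (a.drop k) (k - k) (m - k) (by simp; omega) (by simp; omega)
    exact fun y hy => hdp.mem_iff.mp hy
  -- min property in element form
  have hminelem : ∀ y ∈ a.drop k, a[m] ≤ y := by
    intro y hy
    obtain ⟨j, hj, rfl⟩ := List.mem_iff_getElem.mp hy
    rw [List.getElem_drop]
    have h1 := hmin (k + j) (by omega) (by simp at hj; omega)
    rwa [List.getD_eq_getElem _ ' ' hm2', List.getD_eq_getElem _ ' ' (by simp at hj; omega)] at h1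
  have hmemtake : ∀ x ∈ a.take k, x ≤ a[m] := by
    intro x hx
    exact hord x hx a[m] (by
      rw [List.drop_eq_getElem_cons (by omega : k < a.length)]
      rcases Nat.eq_or_lt_of_le hm1 with rfl | hlt
      · exact List.mem_cons_self
      · apply List.mem_cons_of_mem
        have : a[m] = (a.drop (k+1))[m - (k+1)]'(by simp; omega) := by
          rw [List.getElem_drop]; congr 1; omega
        rw [this]; exact List.getElem_mem _)
  unfold pvInv
  rw [hstep]
  refine ⟨by omega, hperm'.trans hperm, ?_, ?_⟩
  · rw [htake1, List.pairwise_append]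
    refine ⟨hpw, by simp, ?_⟩
    intro x hx b hb
    rw [List.mem_singleton] at hb
    subst hb
    exact hmemtake x hx
  · intro x hx y hy
    have hy' : y ∈ a.drop k := by
      apply hdropsub
      rw [List.drop_eq_getElem_cons (by omega : k < a'.length)]
      exact List.mem_cons_of_mem _ hy
    rw [htake1] at hx
    rcases List.mem_append.mp hx with hx | hx
    · exact hord x hx y hy'
    · rw [List.mem_singleton] at hx; subst hx
      exact hminelem y hy'
-- Folding the outer loop preserves/extends the invariant.
theorem pvFold_inv (cs : List Char) :
    pvInv cs cs.length ((List.range cs.length).foldl (pvStep cs.length) cs) := by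
  suffices h : ∀ k, k ≤ cs.length → pvInv cs k ((List.range k).foldl (pvStep cs.length) cs) by
    exact h cs.length le_rfl
  intro k
  induction k with
  | zero => intro _; exact ⟨rfl, List.Perm.refl cs, by simp, by simp⟩
  | succ k ih =>
    intro hk
    rw [List.range_succ, List.foldl_append, List.foldl_cons, List.foldl_nil]
    exact pvStep_inv cs _ k (by omega) (ih (by omega))

-- The selection-sorted list IS PySem's sorted list.
theorem pvSelSort_eq_sorted (cs : List Char) :
    (List.range cs.length).foldl (pvStep cs.length) cs
      = PySem.List.sorted cs (fun c => c) false := by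
  obtain ⟨hlen, hperm, hpw, _⟩ := pvFold_inv cs
  have htk : ((List.range cs.length).foldl (pvStep cs.length) cs).take cs.length
      = (List.range cs.length).foldl (pvStep cs.length) cs := by
    apply List.take_of_length_le; omega
  rw [htk] at hpw
  exact (PySem.List.sorted_id_eq_of_perm_of_pairwise cs _ hperm hpw).symm

-- ===== VERDICT (by name: the statement is the Claim_ definition above) =====
theorem find_median_char_manual_spec : Claim_equal_find_median_char_manual := by
  intro s _ hpre
  unfold Spec_find_median_char_manual find_median_char_manual find_median_char_manual_alt
  simp only []
  rw [pvSelSort_eq_sorted s.toList]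
  have hlen : (PySem.List.sorted s.toList (fun c => c) false).length = s.toList.length :=
    PySem.List.length_sorted _ _ _
  have hne : s.toList.length ≠ 0 := by
    intro h
    have h0 : s.toList = [] := List.eq_nil_of_length_eq_zero h
    exact hpre (by rw [← String.ofList_toList (s := s), h0])
  set n := s.toList.length with hn
  have hpos : 1 ≤ n := by omega
  have hidx : (if PySem.Int.mod (n : Int) 2 = 1 then PySem.Int.floordiv (n : Int) 2
      else PySem.Int.floordiv (n : Int) 2 - 1)
      = PySem.Int.floordiv ((((PySem.List.sorted s.toList (fun c => c) false).length : Nat) : Int) - 1) 2 := by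
    rw [hlen]
    rw [PySem.Int.mod_eq_emod_of_pos (by norm_num), PySem.Int.floordiv_eq_ediv_of_pos (by norm_num),
        PySem.Int.floordiv_eq_ediv_of_pos (by norm_num)]
    split_ifs with h
    · omega
    · omega
  rw [hidx]
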